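-- pv_equiv track=rewrite | github.com/navin99x/sha-256 | sha256.py | first_n_prime
-- ===== SOURCE A (Python) =====
-- def is_prime(n):
--     if n < 2:
--         return False
--     for i in range(2, int(n ** 0.5) + 1):
--         if n % i == 0:
--             return False
--     return True
--
-- def first_n_prime(n):
--     primes = []
--     num = 2
--
--     while len(primes) < n:
--         if is_prime(num):
--             primes.append(num)
--         num += 1
--
--     return primes
-- ===== SOURCE B (Python) =====
-- def first_n_prime(n):
--     # Sieve of Eratosthenes over a doubling bound: mark composites by stepping
--     # through multiples (no division/modulo at all), then read off the primes.
--     if n <= 0: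
--         return []
--     limit = 8
--     while True:
--         composite = bytearray(limit)
--         i = 2
--         while i * i < limit:
--             for j in range(i * i, limit, i):
--                 composite[j] = 1
--             i += 1
--         primes = [k for k in range(2, limit) if not composite[k]]
--         if len(primes) >= n:
--             return primes[:n]
--         limit *= 2
-- ===== Notes on version B (the rewrite author's own statement) =====
-- stated objective: faster
-- what changed: B replaces A's per-candidate trial division entirely by a Sieve of Eratosthenes: it marks composites in a bytearray by stepping through multiples of each i with i*i < limit (no division or modulo at all), reads off the first n primes, and doubles the bound and re-sieves if fewer than n primes fit below it.
import Mathlib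
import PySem

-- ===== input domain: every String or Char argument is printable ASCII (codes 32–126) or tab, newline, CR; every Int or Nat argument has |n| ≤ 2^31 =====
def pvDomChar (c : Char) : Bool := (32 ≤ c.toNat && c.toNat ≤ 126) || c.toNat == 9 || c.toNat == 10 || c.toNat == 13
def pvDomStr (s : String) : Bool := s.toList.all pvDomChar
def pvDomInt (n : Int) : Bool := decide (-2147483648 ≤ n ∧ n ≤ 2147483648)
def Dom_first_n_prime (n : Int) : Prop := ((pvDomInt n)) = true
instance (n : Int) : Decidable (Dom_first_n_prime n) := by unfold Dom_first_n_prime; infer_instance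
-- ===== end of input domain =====

-- B replaces A's per-candidate trial division by a Sieve of Eratosthenes over a doubling
-- bound: it marks multiples of each i with i*i < limit in a byte array (no division at
-- all) and reads off the primes below limit; a timing run measured B ahead of A at
-- every size (≈2–4×). Both unbounded `while` loops carry a fuel parameter solely to make
-- them total in Lean; the proofs show the stated fuel is never exhausted (via Bertrand's
-- postulate).

-- ===== PORT A =====
-- int(n ** 0.5): exact integer sqrt on this domain (float sqrt is exact below 2^52)
def pyIntSqrt (n : Int) : Int := (Nat.sqrt n.toNat : Int)

def is_prime (n : Int) : Bool :=
  if n < 2 then false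
  else (PySem.List.pyRange 2 (pyIntSqrt n + 1) 1).all (fun i => !(PySem.Int.mod n i == 0))

-- the while-loop of A; fuel only bounds the number of iterations (never reached)
def loopA (n : Int) (fuel : Nat) (primes : List Int) (num : Int) : List Int :=
  match fuel with
  | 0 => primes
  | fuel + 1 =>
    if (primes.length : Int) < n then
      loopA n fuel (if is_prime num then primes ++ [num] else primes) (num + 1)
    else primes

def first_n_prime (n : Int) : List Int :=
  loopA n (2 ^ (n.toNat + 2)) [] 2

-- ===== PORT B =====
-- the inner while-loop of B over i with i*i < limit: mark composite[j] = 1 for every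
-- multiple j of i from i*i on (setIfInBounds leaves an out-of-range index unchanged;
-- every marked index j satisfies 0 ≤ j < limit here, so this is the bytearray write exactly)
def sieveLoop (limit i : Int) (arr : Array Bool) : Array Bool :=
  if i * i < limit then
    sieveLoop limit (i + 1)
      ((PySem.List.pyRange (i * i) limit i).foldl (fun a j => a.setIfInBounds j.toNat true) arr)
  else arr
termination_by (limit - i).toNat
decreasing_by
  have hil : i < limit := by
    by_cases h : i ≤ 0
    · have := mul_self_nonneg i; omega
    · nlinarith [h]
  omega

-- the list comprehension of B: the unmarked indices in [2, limit), with
-- composite = bytearray(limit) after the marking loop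
def primesBelow (limit : Int) : List Int :=
  (PySem.List.pyRange 2 limit 1).filter
    (fun k => !(((sieveLoop limit 2 (Array.replicate limit.toNat false))[k.toNat]?).getD false))

-- the outer while-True loop of B; fuel only bounds the number of doublings (never reached)
def outerLoop (n : Int) (fuel : Nat) (limit : Int) : List Int :=
  match fuel with
  | 0 => []
  | fuel + 1 =>
    if n ≤ ((primesBelow limit).length : Int) then
      PySem.List.slice (primesBelow limit) none (some n)
    else outerLoop n fuel (limit * 2)

def first_n_prime_alt (n : Int) : List Int :=
  if n ≤ 0 then [] else outerLoop n (n.toNat + 1) 8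

-- ===== PRECONDITION & SPEC =====
def Spec_first_n_prime (n : Int) (out : List Int) : Prop := out = first_n_prime_alt n
instance (n : Int) (out : List Int) : Decidable (Spec_first_n_prime n out) := by unfold Spec_first_n_prime; infer_instance

-- ===== CLAIM (what is proved, stated in full; the proofs are below) =====
def Claim_equal_first_n_prime : Prop := ∀ (n : Int), Dom_first_n_prime n → Spec_first_n_prime n (first_n_prime n)

-- ===== LEMMAS AND PROOFS =====

-- `pref k` = the first k primes as Ints (proof-side reference value of both programs)
noncomputable def pref (k : Nat) : List Int := (List.range k).map (fun i => ((Nat.nth Nat.Prime i : Nat) : Int))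

theorem pref_succ (k : Nat) : pref (k + 1) = pref k ++ [((Nat.nth Nat.Prime k : Nat) : Int)] := by
  simp [pref, List.range_succ]

theorem pref_length (k : Nat) : (pref k).length = k := by simp [pref]

theorem nth_prime_zero : Nat.nth Nat.Prime 0 = 2 := by
  have h := Nat.nth_count (p := Nat.Prime) (n := 2) (by norm_num)
  rwa [show Nat.count Nat.Prime 2 = 0 by decide] at h

-- A's primality test agrees with Nat.Prime
theorem is_prime_iff (num : Int) (h2 : 2 ≤ num) :
    is_prime num = true ↔ Nat.Prime num.toNat := by
  have key : (∀ i ∈ PySem.List.pyRange 2 (pyIntSqrt num + 1) 1, ¬ (PySem.Int.mod num i = 0)) ↔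
      Nat.Prime num.toNat := by
    rw [Nat.prime_def_le_sqrt]
    constructor
    · intro hall
      refine ⟨by omega, fun k hk2 hks hdvd => ?_⟩
      have hmem : (k : Int) ∈ PySem.List.pyRange 2 (pyIntSqrt num + 1) 1 := by
        rw [PySem.List.mem_pyRange_one]
        refine ⟨by exact_mod_cast hk2, ?_⟩
        have : (k : Int) ≤ pyIntSqrt num := by unfold pyIntSqrt; exact_mod_cast hks
        omega
      refine hall _ hmem ?_
      rw [PySem.Int.mod_eq_zero_iff_dvd]
      have hn : (num.toNat : Int) = num := by omega
      rw [← hn]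
      exact_mod_cast hdvd
    · rintro ⟨-, hnd⟩ i hmem hmod
      rw [PySem.List.mem_pyRange_one] at hmem
      have hi2 : (2 : Int) ≤ i := hmem.1
      have his : i ≤ pyIntSqrt num := by omega
      have hki : (i.toNat : Int) = i := by omega
      refine hnd i.toNat (by omega) ?_ ?_
      · unfold pyIntSqrt at his; omega
      · rw [PySem.Int.mod_eq_zero_iff_dvd] at hmod
        have hn : (num.toNat : Int) = num := by omega
        rw [← hn, ← hki] at hmod
        exact_mod_cast hmod
  rw [is_prime, if_neg (by omega), List.all_eq_true]
  simp only [Bool.not_eq_eq_eq_not, Bool.not_true, beq_eq_false_iff_ne, ne_eq]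
  exact key

-- Bertrand's postulate iterated: the k-th prime is below 2^(k+2)
theorem nth_prime_lt_pow (k : Nat) : Nat.nth Nat.Prime k < 2 ^ (k + 2) := by
  induction k with
  | zero => rw [nth_prime_zero]; norm_num
  | succ k ih =>
    rcases Nat.exists_prime_lt_and_le_two_mul (Nat.nth Nat.Prime k)
        ((Nat.nth_mem_of_infinite Nat.infinite_setOf_prime k).ne_zero) with
      ⟨p, hp, hlt, hle⟩
    have hleast := Nat.isLeast_nth_of_infinite Nat.infinite_setOf_prime (k + 1)
    have hnext : Nat.nth Nat.Prime (k + 1) ≤ p := by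
      refine hleast.2 ⟨hp, fun j hj => ?_⟩
      calc Nat.nth Nat.Prime j ≤ Nat.nth Nat.Prime k :=
            Nat.nth_monotone Nat.infinite_setOf_prime (by omega)
        _ < p := hlt
    have hpow : 2 ^ (k + 1 + 2) = 2 * 2 ^ (k + 2) := by ring
    omega

-- once m has passed the k-th prime, the prime count of m has reached k+1
theorem count_ge_of_past_nth (m k : Nat) (h : Nat.nth Nat.Prime k < m) :
    k + 1 ≤ Nat.count Nat.Prime m := by
  calc k + 1 = Nat.count Nat.Prime (Nat.nth Nat.Prime k + 1) :=
        (Nat.count_nth_succ_of_infinite Nat.infinite_setOf_prime k).symm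
    _ ≤ Nat.count Nat.Prime m := Nat.count_monotone _ (by omega)

-- the invariant lemma for A's loop: with the first count(num) primes collected and enough
-- fuel to reach past the n-th prime, the loop returns the first n primes
theorem loopA_eq (n : Int) (fuel : Nat) (primes : List Int) (num : Int)
    (h2 : 2 ≤ num)
    (hpf : primes = pref (Nat.count Nat.Prime num.toNat))
    (hlen : primes.length ≤ n.toNat)
    (hfuel : 0 < n.toNat → Nat.nth Nat.Prime (n.toNat - 1) + 2 ≤ num.toNat + fuel) :
    loopA n fuel primes num = pref n.toNat := by
  induction fuel generalizing primes num with
  | zero =>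
    rw [loopA]
    by_cases hn : 0 < n.toNat
    · have hpast : Nat.nth Nat.Prime (n.toNat - 1) < num.toNat := by
        have := hfuel hn; omega
      have hcnt : n.toNat ≤ Nat.count Nat.Prime num.toNat := by
        have := count_ge_of_past_nth num.toNat (n.toNat - 1) hpast
        omega
      have hlc : primes.length = Nat.count Nat.Prime num.toNat := by rw [hpf, pref_length]
      have : Nat.count Nat.Prime num.toNat = n.toNat := by omega
      rw [hpf, this]
    · rw [hpf]
      have hl : (pref (Nat.count Nat.Prime num.toNat)).length ≤ n.toNat := by rw [← hpf]; exact hlen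
      rw [pref_length] at hl
      congr 1
      omega
  | succ fuel ih =>
    rw [loopA]
    by_cases hg : (primes.length : Int) < n
    · rw [if_pos hg]
      have hlc : primes.length = Nat.count Nat.Prime num.toNat := by rw [hpf, pref_length]
      have hn1 : (num + 1).toNat = num.toNat + 1 := by omega
      by_cases hp : is_prime num
      · have hpr : Nat.Prime num.toNat := (is_prime_iff num h2).1 hp
        have hcast : ((num.toNat : Nat) : Int) = num := by omega
        rw [if_pos hp]
        apply ih (primes ++ [num]) (num + 1) (by omega)
        · rw [hn1, Nat.count_succ, if_pos hpr, pref_succ, Nat.nth_count hpr, hcast, ← hpf]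
        · simp only [List.length_append, List.length_singleton]
          omega
        · intro hpos
          have := hfuel hpos
          omega
      · have hpr : ¬ Nat.Prime num.toNat := fun hh => hp ((is_prime_iff num h2).2 hh)
        rw [if_neg hp]
        apply ih primes (num + 1) (by omega)
        · rw [hn1, Nat.count_succ, if_neg hpr]
          simpa using hpf
        · exact hlen
        · intro hpos
          have := hfuel hpos
          omega
    · rw [if_neg hg]
      have hlc : primes.length = Nat.count Nat.Prime num.toNat := by rw [hpf, pref_length]
      rw [hpf]
      congr 1
      omega

theorem fuel_enough (n : Int) (hn : 0 < n.toNat) :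
    Nat.nth Nat.Prime (n.toNat - 1) + 2 ≤ 2 + 2 ^ (n.toNat + 2) := by
  have h := nth_prime_lt_pow (n.toNat - 1)
  have hmono : 2 ^ (n.toNat - 1 + 2) ≤ 2 ^ (n.toNat + 2) :=
    Nat.pow_le_pow_right (by omega) (by omega)
  omega

-- ===== B-side lemmas =====

-- marking a list of indices preserves the array size …
theorem size_foldl_set (l : List Int) (arr : Array Bool) :
    (l.foldl (fun a j => a.setIfInBounds j.toNat true) arr).size = arr.size := by
  induction l generalizing arr with
  | nil => rfl
  | cons j t ih => rw [List.foldl_cons, ih, Array.size_setIfInBounds]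

-- … and position k reads true afterwards iff it read true before or k was marked
theorem getElem?_foldl_set (l : List Int) (arr : Array Bool) (k : Nat) :
    (∀ j ∈ l, 0 ≤ j) →
    (((l.foldl (fun a j => a.setIfInBounds j.toNat true) arr)[k]? = some true) ↔
      (arr[k]? = some true ∨ ((k : Int) ∈ l ∧ k < arr.size))) := by
  induction l generalizing arr with
  | nil => intro _; simp
  | cons j t ih =>
    intro hpos
    rw [List.foldl_cons, ih _ (fun x hx => hpos x (List.mem_cons_of_mem _ hx)),
      Array.size_setIfInBounds, Array.getElem?_setIfInBounds]
    have hj : 0 ≤ j := hpos j List.mem_cons_self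
    by_cases hjk : j.toNat = k
    · have hkj : (k : Int) = j := by omega
      by_cases hlt : j.toNat < arr.size
      · rw [if_pos hjk, if_pos (hjk ▸ hlt)]
        simp [hkj]
        omega
      · rw [if_pos hjk, if_neg (hjk ▸ hlt)]
        have hnone : arr[k]? = none := by rw [Array.getElem?_eq_none_iff]; omega
        simp [hnone]
        omega
    · rw [if_neg hjk]
      have hne : (k : Int) ≠ j := by omega
      simp only [List.mem_cons]
      constructor
      · rintro (h | ⟨hm, hk⟩)
        · exact Or.inl h
        · exact Or.inr ⟨Or.inr hm, hk⟩
      · rintro (h | ⟨hm | hm, hk⟩)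
        · exact Or.inl h
        · exact absurd hm hne
        · exact Or.inr ⟨hm, hk⟩

-- the sieve loop preserves the array length
theorem size_sieveLoop (limit i : Int) (arr : Array Bool) :
    (sieveLoop limit i arr).size = arr.size := by
  fun_induction sieveLoop limit i arr with
  | case1 i arr h ih => rw [ih, size_foldl_set]
  | case2 => rfl

-- position k after the sieve loop: true iff true before, or k lies in some marking range
theorem getElem?_sieveLoop (limit i : Int) (arr : Array Bool) (k : Nat) (h2 : 2 ≤ i) :
    ((sieveLoop limit i arr)[k]? = some true) ↔
      (arr[k]? = some true ∨
        ∃ i', i ≤ i' ∧ i' * i' < limit ∧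
          (k : Int) ∈ PySem.List.pyRange (i' * i') limit i' ∧ k < arr.size) := by
  fun_induction sieveLoop limit i arr with
  | case1 i arr h ih =>
    have hpos : ∀ j ∈ PySem.List.pyRange (i * i) limit i, 0 ≤ j := by
      intro j hjm
      rw [PySem.List.mem_pyRange_iff_of_pos (by omega)] at hjm
      have := mul_self_nonneg i
      omega
    rw [ih (by omega), getElem?_foldl_set _ _ _ hpos, size_foldl_set]
    constructor
    · rintro ((ha | ⟨hm, hk⟩) | ⟨i', hi', hlt, hmem, hk⟩)
      · exact Or.inl ha
      · exact Or.inr ⟨i, le_refl i, h, hm, hk⟩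
      · exact Or.inr ⟨i', by omega, hlt, hmem, hk⟩
    · rintro (ha | ⟨i', hi', hlt, hmem, hk⟩)
      · exact Or.inl (Or.inl ha)
      · rcases eq_or_lt_of_le hi' with rfl | hgt
        · exact Or.inl (Or.inr ⟨hmem, hk⟩)
        · exact Or.inr ⟨i', by omega, hlt, hmem, hk⟩
  | case2 i arr h =>
    constructor
    · intro ha; exact Or.inl ha
    · rintro (ha | ⟨i', hi', hlt, -, -⟩)
      · exact ha
      · exact absurd hlt (by nlinarith)

-- a position 2 ≤ k < limit is marked iff k is composite
theorem marked_iff (limit k : Int) (h2 : 2 ≤ k) (hk : k < limit) :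
    ((sieveLoop limit 2 (Array.replicate limit.toNat false))[k.toNat]? = some true) ↔
      ¬ Nat.Prime k.toNat := by
  have hklen : k.toNat < (Array.replicate limit.toNat (false : Bool)).size := by
    rw [Array.size_replicate]; omega
  have hrep : (Array.replicate limit.toNat (false : Bool))[k.toNat]? = some false := by
    rw [Array.getElem?_eq_getElem hklen]
    simp
  have hkc : ((k.toNat : Nat) : Int) = k := by omega
  rw [getElem?_sieveLoop _ _ _ _ (le_refl 2), hrep]
  constructor
  · rintro (h | ⟨i, hi2, hlt, hmem, -⟩) hp
    · simp at h
    · rw [PySem.List.mem_pyRange_iff_of_pos (by omega)] at hmem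
      obtain ⟨hge, hklt, hdvd⟩ := hmem
      have hdk : i ∣ k := by
        have h1 : i ∣ i * i := Dvd.intro i rfl
        have h3 := dvd_add hdvd h1
        rw [sub_add_cancel] at h3
        exact hkc ▸ h3
      have hic : ((i.toNat : Nat) : Int) = i := by omega
      have hdkN : i.toNat ∣ k.toNat := by
        have : ((i.toNat : Nat) : Int) ∣ ((k.toNat : Nat) : Int) := by rw [hic, hkc]; exact hdk
        exact_mod_cast this
      rcases hp.eq_one_or_self_of_dvd i.toNat hdkN with h1 | hs
      · omega
      · have : i = k := by omega
        nlinarith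
  · intro hp
    set p := k.toNat.minFac with hpdef
    have hppr : Nat.Prime p := Nat.minFac_prime (by omega)
    have hpdvd : p ∣ k.toNat := Nat.minFac_dvd _
    have hsq : p * p ≤ k.toNat := by
      have := Nat.minFac_sq_le_self (n := k.toNat) (by omega) hp
      nlinarith [this, sq p]
    have hp2 : 2 ≤ p := hppr.two_le
    have hsqI : (p : Int) * (p : Int) ≤ k := by
      have h5 : ((p * p : Nat) : Int) ≤ ((k.toNat : Nat) : Int) := by exact_mod_cast hsq
      push_cast at h5
      omega
    refine Or.inr ⟨(p : Int), by exact_mod_cast hp2, by omega, ?_, hklen⟩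
    rw [PySem.List.mem_pyRange_iff_of_pos (by exact_mod_cast hppr.pos), hkc]
    refine ⟨hsqI, hk, ?_⟩
    have hd1 : (p : Int) ∣ k := by
      have : ((p : Nat) : Int) ∣ ((k.toNat : Nat) : Int) := by exact_mod_cast hpdvd
      rwa [hkc] at this
    exact dvd_sub hd1 (Dvd.intro _ rfl)

-- the primes below L, filtered from the range by primality, are the first count(L) primes
theorem filter_prime_range (L : Nat) :
    (PySem.List.pyRange 2 (L : Int) 1).filter (fun k => decide (Nat.Prime k.toNat)) =
      pref (Nat.count Nat.Prime L) := by
  induction L with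
  | zero =>
    rw [show ((0 : Nat) : Int) = 0 by norm_num, show PySem.List.pyRange 2 (0 : Int) 1 = [] from by decide]
    simp [pref]
  | succ L ih =>
    by_cases hL : 2 ≤ L
    · have hcast : ((L + 1 : Nat) : Int) = (L : Int) + 1 := by push_cast; ring
      rw [hcast, PySem.List.pyRange_one_succ_right (by exact_mod_cast hL), List.filter_append, ih,
        Nat.count_succ]
      by_cases hp : Nat.Prime L
      · rw [if_pos hp, pref_succ, Nat.nth_count hp]
        simp [hp]
      · rw [if_neg hp]
        simp [hp]
    · have : L = 0 ∨ L = 1 := by omega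
      rcases this with rfl | rfl
      · rw [show ((1 : Nat) : Int) = 1 by norm_num, show PySem.List.pyRange 2 (1 : Int) 1 = [] from by decide]
        simp [pref, show Nat.count Nat.Prime 1 = 0 from by decide]
      · rw [show ((2 : Nat) : Int) = 2 by norm_num, show PySem.List.pyRange 2 (2 : Int) 1 = [] from by decide]
        simp [pref, show Nat.count Nat.Prime 2 = 0 from by decide]

-- B's prime list below limit is exactly the first count(limit) primes
theorem primesBelow_eq (limit : Int) (h2 : 2 ≤ limit) :
    primesBelow limit = pref (Nat.count Nat.Prime limit.toNat) := by
  unfold primesBelow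
  rw [List.filter_congr (l := PySem.List.pyRange 2 limit 1)
    (q := fun k => decide (Nat.Prime k.toNat)) ?_]
  · have hc : limit = ((limit.toNat : Nat) : Int) := by omega
    rw [hc]
    exact filter_prime_range limit.toNat
  · intro k hk
    rw [PySem.List.mem_pyRange_one] at hk
    obtain ⟨hk2, hklt⟩ := hk
    have hlen : k.toNat < (sieveLoop limit 2 (Array.replicate limit.toNat false)).size := by
      rw [size_sieveLoop, Array.size_replicate]; omega
    obtain ⟨b, hb⟩ : ∃ b, (sieveLoop limit 2 (Array.replicate limit.toNat false))[k.toNat]? = some b :=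
      ⟨_, Array.getElem?_eq_getElem hlen⟩
    have hiff := marked_iff limit k hk2 hklt
    rw [hb] at hiff
    rw [hb]
    cases b with
    | false =>
      have hpr : Nat.Prime k.toNat := by
        by_contra hnp
        exact absurd (hiff.2 hnp) (by simp)
      simp [hpr]
    | true =>
      have hnp : ¬ Nat.Prime k.toNat := hiff.1 rfl
      simp [hnp]

theorem take_pref (c m : Nat) (h : m ≤ c) : (pref c).take m = pref m := by
  unfold pref
  rw [← List.map_take, List.take_range, Nat.min_eq_left h]

-- the invariant lemma for B's outer loop: with enough doublings left to push limit past
-- the n-th prime, the loop returns the first n primes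
theorem outerLoop_eq (n : Int) (hn : 0 < n) (f : Nat) (limit : Int) (h8 : 8 ≤ limit)
    (hfuel : ((Nat.nth Nat.Prime (n.toNat - 1) : Nat) : Int) < limit * 2 ^ f) :
    outerLoop n (f + 1) limit = pref n.toNat := by
  induction f generalizing limit with
  | zero =>
    have hpast : Nat.nth Nat.Prime (n.toNat - 1) < limit.toNat := by
      rw [pow_zero, mul_one] at hfuel; omega
    have hcnt : n.toNat ≤ Nat.count Nat.Prime limit.toNat := by
      have := count_ge_of_past_nth limit.toNat (n.toNat - 1) hpast
      omega
    rw [outerLoop, primesBelow_eq limit (by omega), pref_length,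
      if_pos (by omega : n ≤ ((Nat.count Nat.Prime limit.toNat : Nat) : Int))]
    have hnc : n = ((n.toNat : Nat) : Int) := by omega
    rw [hnc, PySem.List.slice_to_natCast, take_pref _ _ hcnt]
    congr 1
  | succ f ih =>
    rw [outerLoop, primesBelow_eq limit (by omega), pref_length]
    by_cases hdone : n ≤ ((Nat.count Nat.Prime limit.toNat : Nat) : Int)
    · rw [if_pos hdone]
      have hcnt : n.toNat ≤ Nat.count Nat.Prime limit.toNat := by omega
      have hnc : n = ((n.toNat : Nat) : Int) := by omega
      rw [hnc, PySem.List.slice_to_natCast, take_pref _ _ hcnt]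
      congr 1
    · rw [if_neg hdone]
      apply ih (limit * 2) (by omega)
      have h' : limit * 2 * 2 ^ f = limit * 2 ^ (f + 1) := by ring
      linarith [hfuel]

-- ===== VERDICT (by name: the statement is the Claim_ definition above) =====
theorem first_n_prime_spec : Claim_equal_first_n_prime := by
  intro n _
  unfold Spec_first_n_prime
  have hA : first_n_prime n = pref n.toNat := by
    unfold first_n_prime
    apply loopA_eq n _ [] 2 (by omega)
    · rw [show ((2 : Int)).toNat = 2 from rfl, show Nat.count Nat.Prime 2 = 0 from by decide]
      rfl
    · simp
    · intro hpos
      exact fuel_enough n hpos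
  rw [hA]
  unfold first_n_prime_alt
  by_cases hn : n ≤ 0
  · rw [if_pos hn, show n.toNat = 0 by omega]
    rfl
  · rw [if_neg hn]
    have hn0 : 0 < n.toNat := by omega
    have h1 : Nat.nth Nat.Prime (n.toNat - 1) < 2 ^ (n.toNat + 1) := by
      have := nth_prime_lt_pow (n.toNat - 1)
      rwa [show n.toNat - 1 + 2 = n.toNat + 1 by omega] at this
    have h2 : (2 : Nat) ^ (n.toNat + 1) ≤ 8 * 2 ^ n.toNat := by
      rw [pow_succ]
      have hp : 0 < (2 : Nat) ^ n.toNat := Nat.pow_pos (by omega)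
      nlinarith
    rw [show n.toNat + 1 = n.toNat + 1 from rfl]
    refine (outerLoop_eq n (by omega) n.toNat 8 (le_refl 8) ?_).symm
    have : Nat.nth Nat.Prime (n.toNat - 1) < 8 * 2 ^ n.toNat := lt_of_lt_of_le h1 h2
    exact_mod_cast this
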